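-- pv_equiv track=rewrite | github.com/chotchki/Quicksight-Generator | tests/test_account_recon.py | _parse_balanced_rows
-- ===== SOURCE A (Python) =====
-- def _parse_balanced_rows(body: str) -> list[str]:
--     """Split a VALUES body into rows respecting nested parens (metadata
--     JSON may contain commas; the row tokenizer must walk parens depth)."""
--     rows: list[str] = []
--     depth = 0
--     start = None
--     for i, ch in enumerate(body):
--         if ch == "(" and depth == 0:
--             start = i
--             depth = 1
--         elif ch == "(":
--             depth += 1
--         elif ch == ")":
--             depth -= 1
--             if depth == 0:
--                 rows.append(body[start + 1:i])
--     return rows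
-- ===== SOURCE B (Python) =====
-- def _parse_balanced_rows(body: str) -> list[str]:
--     """Two-phase reimplementation: first build a prefix depth-before table
--     (pure cumulative +/-1 sum, negatives allowed), then read group-start indices
--     (opening paren at depth 0) and group-end indices (closing paren at depth 1) off the table and zip
--     them into slices."""
--     depths = []
--     depth = 0
--     for ch in body:
--         depths.append(depth)
--         depth += (ch == "(") - (ch == ")")
--     starts = [i for i, ch in enumerate(body) if ch == "(" and depths[i] == 0]
--     ends = [i for i, ch in enumerate(body) if ch == ")" and depths[i] == 1]
--     return [body[s + 1:e] for s, e in zip(starts, ends)]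
-- ===== Notes on version B (the rewrite author's own statement) =====
-- stated objective: alternative
-- what changed: Replaced the single stateful depth/start/rows scan by a two-phase tokenizer: a prefix depth-before table is built first, then group-start indices (an opening paren at depth 0) and group-end indices (a closing paren at depth 1) are read off the table as two filtered index lists and zipped into slices.
import Mathlib
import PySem

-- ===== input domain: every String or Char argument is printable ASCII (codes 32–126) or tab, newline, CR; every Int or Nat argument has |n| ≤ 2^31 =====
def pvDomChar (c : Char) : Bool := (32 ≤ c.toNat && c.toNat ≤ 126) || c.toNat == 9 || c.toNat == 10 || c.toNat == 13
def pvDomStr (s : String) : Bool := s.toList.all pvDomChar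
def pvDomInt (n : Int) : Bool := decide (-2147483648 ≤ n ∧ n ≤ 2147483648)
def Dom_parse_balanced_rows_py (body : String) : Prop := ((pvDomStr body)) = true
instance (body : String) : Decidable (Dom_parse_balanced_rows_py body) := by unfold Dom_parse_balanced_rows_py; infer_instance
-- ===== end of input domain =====

-- B rewrites A's single stateful depth/start scan as a two-phase tokenizer (prefix depth-before
-- table, then filtered start/end index lists zipped into slices); same cost, alternative structure.

-- ===== PORT A =====
-- loop body of A's `for i, ch in enumerate(body)`; state = (rows, depth, start)
def pvStepA (body : String) (acc : List String × Int × Option Int) (ic : Int × Char) :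
    List String × Int × Option Int :=
  let rows := acc.1; let depth := acc.2.1; let start := acc.2.2
  let i := ic.1; let ch := ic.2
  if ch = '(' ∧ depth = 0 then (rows, 1, some i)
  else if ch = '(' then (rows, depth + 1, start)
  else if ch = ')' then
    let d := depth - 1
    if d = 0 then
      (rows ++ [PySem.Str.slice body (some (start.getD 0 + 1)) (some i)], d, start)
    else (rows, d, start)
  else acc

def parse_balanced_rows_py (body : String) : List String :=
  ((PySem.List.enumerate body.toList 0).foldl (pvStepA body) ([], 0, none)).1

-- ===== PORT B =====
def parse_balanced_rows_py_alt (body : String) : List String :=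
  let depths := (body.toList.foldl
      (fun (acc : List Int × Int) ch =>
        (acc.1 ++ [acc.2],
         acc.2 + (if ch = '(' then 1 else 0) - (if ch = ')' then 1 else 0)))
      ([], 0)).1
  let starts := ((PySem.List.enumerate body.toList 0).filter
      (fun ic => decide (ic.2 = '(' ∧ PySem.List.pyGetD depths ic.1 0 = 0))).map (·.1)
  let ends := ((PySem.List.enumerate body.toList 0).filter
      (fun ic => decide (ic.2 = ')' ∧ PySem.List.pyGetD depths ic.1 0 = 1))).map (·.1)
  (starts.zip ends).map (fun se => PySem.Str.slice body (some (se.1 + 1)) (some se.2))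

-- ===== PRECONDITION & SPEC =====
def Spec_parse_balanced_rows_py (body : String) (out : List String) : Prop := out = parse_balanced_rows_py_alt body
instance (body : String) (out : List String) : Decidable (Spec_parse_balanced_rows_py body out) := by unfold Spec_parse_balanced_rows_py; infer_instance

-- ===== CLAIM (what is proved, stated in full; the proofs are below) =====
def Claim_equal_parse_balanced_rows_py : Prop := ∀ (body : String), Dom_parse_balanced_rows_py body → Spec_parse_balanced_rows_py body (parse_balanced_rows_py body)

-- ===== LEMMAS AND PROOFS =====

/-- depth contribution of one character -/
def pvDelta (c : Char) : Int := (if c = '(' then 1 else 0) - (if c = ')' then 1 else 0)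

/-- cumulative depth of a prefix -/
def pvCum : List Char → Int
  | [] => 0
  | c :: cs => pvDelta c + pvCum cs

/-- recursive form of B's depth-before table starting at depth d -/
def pvTbl (d : Int) : List Char → List Int
  | [] => []
  | c :: cs => d :: pvTbl (d + pvDelta c) cs

/-- start indices read off from position i at depth d -/
def pvStarts (i d : Int) : List Char → List Int
  | [] => []
  | c :: cs => (if c = '(' ∧ d = 0 then [i] else []) ++ pvStarts (i + 1) (d + pvDelta c) cs

/-- end indices read off from position i at depth d -/
def pvEnds (i d : Int) : List Char → List Int
  | [] => []
  | c :: cs => (if c = ')' ∧ d = 1 then [i] else []) ++ pvEnds (i + 1) (d + pvDelta c) cs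

def pvZipMap (body : String) (S E : List Int) : List String :=
  (S.zip E).map (fun se => PySem.Str.slice body (some (se.1 + 1)) (some se.2))

lemma pvStarts_cons (i d : Int) (c : Char) (cs : List Char) :
    pvStarts i d (c :: cs)
      = (if c = '(' ∧ d = 0 then [i] else []) ++ pvStarts (i + 1) (d + pvDelta c) cs := rfl

lemma pvEnds_cons (i d : Int) (c : Char) (cs : List Char) :
    pvEnds i d (c :: cs)
      = (if c = ')' ∧ d = 1 then [i] else []) ++ pvEnds (i + 1) (d + pvDelta c) cs := rfl

lemma pvTbl_foldl (l : List Char) : ∀ (acc : List Int) (d : Int),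
    (l.foldl (fun (acc : List Int × Int) ch =>
        (acc.1 ++ [acc.2],
         acc.2 + (if ch = '(' then 1 else 0) - (if ch = ')' then 1 else 0)))
      (acc, d)).1 = acc ++ pvTbl d l := by
  induction l with
  | nil => intro acc d; simp [pvTbl]
  | cons c cs ih =>
    intro acc d
    have h : d + (if c = '(' then (1:Int) else 0) - (if c = ')' then 1 else 0) = d + pvDelta c := by
      simp [pvDelta]; ring
    simp only [List.foldl_cons, h, ih]
    simp [pvTbl]

lemma pvTbl_lookup (l : List Char) : ∀ (d : Int) (j : Nat), j < l.length →
    PySem.List.pyGetD (pvTbl d l) (j : Int) 0 = d + pvCum (l.take j) := by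
  induction l with
  | nil => intro d j h; simp at h
  | cons c cs ih =>
    intro d j h
    cases j with
    | zero => simp [pvTbl, pvCum]
    | succ k =>
      have hk : k < cs.length := by simpa using h
      have h2 := ih (d + pvDelta c) k hk
      rw [PySem.List.pyGetD_natCast] at h2
      rw [PySem.List.pyGetD_natCast]
      simp only [pvTbl, pvCum, List.take_succ_cons, List.getD_cons_succ]
      rw [h2]; ring

lemma pvFilter_starts (depths : List Int) (l : List Char) :
    ∀ (i d : Int),
    (∀ j : Nat, j < l.length → PySem.List.pyGetD depths (i + j) 0 = d + pvCum (l.take j)) →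
    (((PySem.List.enumerate l i).filter
        (fun ic => decide (ic.2 = '(' ∧ PySem.List.pyGetD depths ic.1 0 = 0))).map (·.1))
      = pvStarts i d l := by
  induction l with
  | nil => intro i d _; simp [PySem.List.enumerate_nil, pvStarts]
  | cons c cs ih =>
    intro i d H
    have h0 : PySem.List.pyGetD depths i 0 = d := by
      have := H 0 (by simp)
      simpa [pvCum] using this
    have H' : ∀ j : Nat, j < cs.length →
        PySem.List.pyGetD depths ((i + 1) + j) 0 = (d + pvDelta c) + pvCum (cs.take j) := by
      intro j hj
      have := H (j + 1) (by simpa using Nat.succ_lt_succ hj)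
      rw [show (i + ((j+1 : Nat) : Int)) = (i + 1) + (j : Nat) by push_cast; ring] at this
      simpa [pvCum, add_assoc] using this
    rw [PySem.List.enumerate_cons]
    by_cases hc : c = '(' ∧ d = 0
    · rw [List.filter_cons_of_pos (by simp [hc.1, hc.2, h0])]
      rw [List.map_cons, ih (i + 1) (d + pvDelta c) H']
      simp only [pvStarts_cons, if_pos hc, List.singleton_append]
    · rw [List.filter_cons_of_neg (by simp [h0]; tauto)]
      rw [ih (i + 1) (d + pvDelta c) H']
      simp only [pvStarts_cons, if_neg hc, List.nil_append]

lemma pvFilter_ends (depths : List Int) (l : List Char) :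
    ∀ (i d : Int),
    (∀ j : Nat, j < l.length → PySem.List.pyGetD depths (i + j) 0 = d + pvCum (l.take j)) →
    (((PySem.List.enumerate l i).filter
        (fun ic => decide (ic.2 = ')' ∧ PySem.List.pyGetD depths ic.1 0 = 1))).map (·.1))
      = pvEnds i d l := by
  induction l with
  | nil => intro i d _; simp [PySem.List.enumerate_nil, pvEnds]
  | cons c cs ih =>
    intro i d H
    have h0 : PySem.List.pyGetD depths i 0 = d := by
      have := H 0 (by simp)
      simpa [pvCum] using this
    have H' : ∀ j : Nat, j < cs.length →
        PySem.List.pyGetD depths ((i + 1) + j) 0 = (d + pvDelta c) + pvCum (cs.take j) := by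
      intro j hj
      have := H (j + 1) (by simpa using Nat.succ_lt_succ hj)
      rw [show (i + ((j+1 : Nat) : Int)) = (i + 1) + (j : Nat) by push_cast; ring] at this
      simpa [pvCum, add_assoc] using this
    rw [PySem.List.enumerate_cons]
    by_cases hc : c = ')' ∧ d = 1
    · rw [List.filter_cons_of_pos (by simp [hc.1, hc.2, h0])]
      rw [List.map_cons, ih (i + 1) (d + pvDelta c) H']
      simp only [pvEnds_cons, if_pos hc, List.singleton_append]
    · rw [List.filter_cons_of_neg (by simp [h0]; tauto)]
      rw [ih (i + 1) (d + pvDelta c) H']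
      simp only [pvEnds_cons, if_neg hc, List.nil_append]

lemma pvB_norm (body : String) :
    parse_balanced_rows_py_alt body
      = pvZipMap body (pvStarts 0 0 body.toList) (pvEnds 0 0 body.toList) := by
  have H : ∀ j : Nat, j < body.toList.length →
      PySem.List.pyGetD (pvTbl 0 body.toList) ((0:Int) + j) 0 = 0 + pvCum (body.toList.take j) := by
    intro j hj
    simpa using pvTbl_lookup body.toList 0 j hj
  have htbl := pvTbl_foldl body.toList [] 0
  rw [List.nil_append] at htbl
  unfold parse_balanced_rows_py_alt
  dsimp only
  rw [htbl]
  rw [pvFilter_starts (pvTbl 0 body.toList) body.toList 0 0 H,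
      pvFilter_ends (pvTbl 0 body.toList) body.toList 0 0 H]
  rfl

lemma pvMain (body : String) (l : List Char) :
    ∀ (i d : Int) (rows : List String) (start : Option Int),
    (d ≤ 0 →
      ((PySem.List.enumerate l i).foldl (pvStepA body) (rows, d, start)).1
        = rows ++ pvZipMap body (pvStarts i d l) (pvEnds i d l)) ∧
    (∀ s : Int, 1 ≤ d → start = some s →
      ((PySem.List.enumerate l i).foldl (pvStepA body) (rows, d, start)).1
        = rows ++ pvZipMap body (s :: pvStarts i d l) (pvEnds i d l)) := by
  induction l with
  | nil =>
    intro i d rows start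
    constructor
    · intro _; simp [PySem.List.enumerate_nil, pvStarts, pvEnds, pvZipMap]
    · intro s _ _; simp [PySem.List.enumerate_nil, pvStarts, pvEnds, pvZipMap]
  | cons c cs ih =>
    intro i d rows start
    rw [PySem.List.enumerate_cons]
    by_cases hc2 : c = '('
    · subst hc2
      constructor
      · intro hd
        by_cases hd0 : d = 0
        · subst hd0
          have hstep : pvStepA body (rows, 0, start) (i, '(') = (rows, 1, some i) := by
            simp [pvStepA]
          have hdel : (0:Int) + pvDelta '(' = 1 := by decide
          rw [List.foldl_cons, hstep,
            (ih (i + 1) 1 rows (some i)).2 i (by norm_num) rfl,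
            pvStarts_cons, pvEnds_cons, hdel,
            if_pos (⟨rfl, rfl⟩ : '(' = '(' ∧ (0:Int) = 0),
            if_neg (fun h => absurd h.1 (by decide)),
            List.singleton_append, List.nil_append]
        · have hstep : pvStepA body (rows, d, start) (i, '(') = (rows, d + 1, start) := by
            simp [pvStepA, hd0]
          have hdel : d + pvDelta '(' = d + 1 := by
            have h1 : pvDelta '(' = 1 := by decide
            rw [h1]
          rw [List.foldl_cons, hstep,
            (ih (i + 1) (d + 1) rows start).1 (by omega),
            pvStarts_cons, pvEnds_cons, hdel,
            if_neg (fun h => hd0 h.2),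
            if_neg (fun h => absurd h.1 (by decide)),
            List.nil_append, List.nil_append]
      · intro s hd hstart
        subst hstart
        have hd0 : ¬ d = 0 := by omega
        have hstep : pvStepA body (rows, d, some s) (i, '(') = (rows, d + 1, some s) := by
          simp [pvStepA, hd0]
        have hdel : d + pvDelta '(' = d + 1 := by
          have h1 : pvDelta '(' = 1 := by decide
          rw [h1]
        rw [List.foldl_cons, hstep,
          (ih (i + 1) (d + 1) rows (some s)).2 s (by omega) rfl,
          pvStarts_cons, pvEnds_cons, hdel,
          if_neg (fun h => hd0 h.2),
          if_neg (fun h => absurd h.1 (by decide)),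
          List.nil_append, List.nil_append]
    · by_cases hc3 : c = ')'
      · subst hc3
        constructor
        · intro hd
          have hne : ¬ (d - 1 = 0) := by omega
          have hstep : pvStepA body (rows, d, start) (i, ')') = (rows, d - 1, start) := by
            simp [pvStepA, hne]
          have hdel : d + pvDelta ')' = d - 1 := by
            have h1 : pvDelta ')' = -1 := by decide
            rw [h1]; ring
          rw [List.foldl_cons, hstep,
            (ih (i + 1) (d - 1) rows start).1 (by omega),
            pvStarts_cons, pvEnds_cons, hdel,
            if_neg (fun h => absurd h.1 (by decide)),
            if_neg (fun h => absurd h.2 (by omega)),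
            List.nil_append, List.nil_append]
        · intro s hd hstart
          subst hstart
          by_cases hd1 : d = 1
          · subst hd1
            have hstep : pvStepA body (rows, 1, some s) (i, ')')
                = (rows ++ [PySem.Str.slice body (some (s + 1)) (some i)], 0, some s) := by
              simp [pvStepA]
            have hdel : (1:Int) + pvDelta ')' = 0 := by decide
            rw [List.foldl_cons, hstep,
              (ih (i + 1) 0 (rows ++ [PySem.Str.slice body (some (s + 1)) (some i)]) (some s)).1
                (le_refl 0),
              pvStarts_cons, pvEnds_cons, hdel,
              if_neg (fun h => absurd h.1 (by decide)),
              if_pos (⟨rfl, rfl⟩ : ')' = ')' ∧ (1:Int) = 1),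
              List.nil_append, List.singleton_append]
            simp [pvZipMap]
          · have hne : ¬ (d - 1 = 0) := by omega
            have hstep : pvStepA body (rows, d, some s) (i, ')') = (rows, d - 1, some s) := by
              simp [pvStepA, hne]
            have hdel : d + pvDelta ')' = d - 1 := by
              have h1 : pvDelta ')' = -1 := by decide
              rw [h1]; ring
            rw [List.foldl_cons, hstep,
              (ih (i + 1) (d - 1) rows (some s)).2 s (by omega) rfl,
              pvStarts_cons, pvEnds_cons, hdel,
              if_neg (fun h => absurd h.1 (by decide)),
              if_neg (fun h => hd1 h.2),
              List.nil_append, List.nil_append]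
      · -- a character that is neither '(' nor ')'
        have hdel : d + pvDelta c = d := by
          have h1 : pvDelta c = 0 := by simp [pvDelta, hc2, hc3]
          rw [h1]; ring
        have hstep : pvStepA body (rows, d, start) (i, c) = (rows, d, start) := by
          simp [pvStepA, hc2, hc3]
        constructor
        · intro hd
          rw [List.foldl_cons, hstep,
            (ih (i + 1) d rows start).1 hd,
            pvStarts_cons, pvEnds_cons, hdel,
            if_neg (fun h => hc2 h.1),
            if_neg (fun h => hc3 h.1),
            List.nil_append, List.nil_append]
        · intro s hd hstart
          subst hstart
          rw [List.foldl_cons, hstep,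
            (ih (i + 1) d rows (some s)).2 s hd rfl,
            pvStarts_cons, pvEnds_cons, hdel,
            if_neg (fun h => hc2 h.1),
            if_neg (fun h => hc3 h.1),
            List.nil_append, List.nil_append]

-- ===== VERDICT (by name: the statement is the Claim_ definition above) =====
theorem parse_balanced_rows_py_spec : Claim_equal_parse_balanced_rows_py := by
  intro body _
  unfold Spec_parse_balanced_rows_py
  rw [pvB_norm]
  unfold parse_balanced_rows_py
  rw [(pvMain body body.toList 0 0 [] none).1 (by norm_num)]
  rw [List.nil_append]
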